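-- pv_equiv track=rewrite | github.com/daniel-reich/ubiquitous-fiesta | LQ9btnAxu7hArLcv7_2.py | diagonalize
-- ===== SOURCE A (Python) =====
-- def diagonalize(n, d):
--   a = [list(range(i, i + n)) for i in range(n)]
--   if d == 'ul':
--     return a
--   if d == 'ur':
--     return [v[::-1] for v in a]
--   if d == 'll':
--     return a[::-1]
--   if d == 'lr':
--     return [v[::-1] for v in a[::-1]]
-- ===== SOURCE B (Python) =====
-- def diagonalize(n, d):
--   if d == 'ul':
--     v, cstep, rstep = 0, 1, 1
--   elif d == 'ur':
--     v, cstep, rstep = n - 1, -1, 1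
--   elif d == 'll':
--     v, cstep, rstep = n - 1, 1, -1
--   elif d == 'lr':
--     v, cstep, rstep = 2 * n - 2, -1, -1
--   else:
--     return None
--   row = []
--   for _ in range(n):
--     row.append(v)
--     v += cstep
--   out = []
--   for _ in range(n):
--     out.append(row)
--     row = [x + rstep for x in row]
--   return out
-- ===== Notes on version B (the rewrite author's own statement) =====
-- stated objective: alternative
-- what changed: B never builds the base matrix or reverses anything: it picks a start value and two increments for the orientation, builds the first row with a running-value accumulator, and derives each subsequent row from the previous one by elementwise addition (an incremental row-to-row construction instead of construct-then-slice).
-- outside the precondition, e.g. on diagonalize(2, 'xx'): A returns None, B returns None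
import Mathlib
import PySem

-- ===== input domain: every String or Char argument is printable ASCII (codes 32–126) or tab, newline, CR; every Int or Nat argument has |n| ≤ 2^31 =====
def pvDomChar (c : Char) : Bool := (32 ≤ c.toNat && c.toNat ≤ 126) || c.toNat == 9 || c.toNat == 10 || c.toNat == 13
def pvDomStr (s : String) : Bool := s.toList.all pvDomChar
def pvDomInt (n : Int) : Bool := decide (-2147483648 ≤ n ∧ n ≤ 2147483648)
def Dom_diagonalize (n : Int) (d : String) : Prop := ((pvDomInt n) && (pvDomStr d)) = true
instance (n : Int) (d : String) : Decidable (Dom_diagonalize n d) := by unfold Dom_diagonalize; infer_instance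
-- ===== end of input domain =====

-- B picks a start value and two increments per orientation, builds the first row with a
-- running accumulator and each next row from the previous by elementwise addition,
-- instead of building a base matrix and reversing by slicing (objective: alternative).

-- ===== PORT A =====
def diagonalize (n : Int) (d : String) : List (List Int) :=
  let a := (PySem.List.pyRange 0 n 1).map (fun i => PySem.List.pyRange i (i + n) 1)
  if d == "ul" then a
  else if d == "ur" then a.map (fun v => (PySem.List.slice? v none none (-1)).getD [])
  else if d == "ll" then (PySem.List.slice? a none none (-1)).getD []
  else if d == "lr" then
    ((PySem.List.slice? a none none (-1)).getD []).map
      (fun v => (PySem.List.slice? v none none (-1)).getD [])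
  else []  -- Python falls through and returns None here (not a list); excluded by Pre_

-- ===== PORT B =====
-- the two accumulator loops of Source B (row-building loop, then row-to-row loop)
def diagonalizeGo (n v cstep rstep : Int) : List (List Int) :=
  let row := ((PySem.List.pyRange 0 n 1).foldl
      (fun (p : List Int × Int) _ => (p.1 ++ [p.2], p.2 + cstep)) ([], v)).1
  ((PySem.List.pyRange 0 n 1).foldl
      (fun (p : List (List Int) × List Int) _ => (p.1 ++ [p.2], p.2.map (· + rstep))) ([], row)).1

def diagonalize_alt (n : Int) (d : String) : List (List Int) :=
  if d == "ul" then diagonalizeGo n 0 1 1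
  else if d == "ur" then diagonalizeGo n (n - 1) (-1) 1
  else if d == "ll" then diagonalizeGo n (n - 1) 1 (-1)
  else if d == "lr" then diagonalizeGo n (2 * n - 2) (-1) (-1)
  else []  -- Python B returns None here; outside Pre_

-- ===== PRECONDITION & SPEC =====
-- Pre_ excludes invalid orientation strings, on which Python A falls through and
-- returns None — not a value of the declared list-of-lists type.
def Pre_diagonalize (n : Int) (d : String) : Prop :=
  d = "ul" ∨ d = "ur" ∨ d = "ll" ∨ d = "lr"
instance (n : Int) (d : String) : Decidable (Pre_diagonalize n d) := by
  unfold Pre_diagonalize; infer_instance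
def pvWitness_diagonalize : Int × String := (3, "ul")

def Spec_diagonalize (n : Int) (d : String) (out : List (List Int)) : Prop := out = diagonalize_alt n d
instance (n : Int) (d : String) (out : List (List Int)) : Decidable (Spec_diagonalize n d out) := by unfold Spec_diagonalize; infer_instance

-- ===== CLAIM (what is proved, stated in full; the proofs are below) =====
def Claim_equal_diagonalize : Prop := ∀ (n : Int) (d : String), Dom_diagonalize n d → Pre_diagonalize n d → Spec_diagonalize n d (diagonalize n d)

-- ===== LEMMAS AND PROOFS =====

-- B's first loop: the row it builds, as a closed map over List.range
lemma rowLoop {α : Type} (l : List α) (acc : List Int) (v c : Int) :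
    l.foldl (fun (p : List Int × Int) _ => (p.1 ++ [p.2], p.2 + c)) (acc, v)
      = (acc ++ (List.range l.length).map (fun (k : Nat) => v + (k : Int) * c),
         v + (l.length : Int) * c) := by
  induction l generalizing acc v with
  | nil => simp
  | cons x t ih =>
    simp only [List.foldl_cons, ih, List.length_cons, List.range_succ_eq_map,
      List.map_cons, List.map_map, Prod.mk.injEq, List.append_assoc,
      List.singleton_append, List.cons.injEq, List.append_cancel_left_eq]
    refine ⟨⟨by simp, ?_⟩, by push_cast; ring⟩
    exact List.map_congr_left fun k _ => by
      simp only [Function.comp_apply, Nat.succ_eq_add_one]; push_cast; ring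

-- B's second loop: each output row is the seed row shifted by k * rstep
lemma outLoop {α : Type} (l : List α) (acc : List (List Int)) (r : List Int) (s : Int) :
    (l.foldl (fun (p : List (List Int) × List Int) _ =>
        (p.1 ++ [p.2], p.2.map (· + s))) (acc, r)).1
      = acc ++ (List.range l.length).map
          (fun (k : Nat) => r.map (fun x => x + (k : Int) * s)) := by
  induction l generalizing acc r with
  | nil => simp
  | cons x t ih =>
    simp only [List.foldl_cons, ih, List.length_cons, List.range_succ_eq_map,
      List.map_cons, List.map_map, List.append_assoc, List.singleton_append,
      List.cons.injEq, List.append_cancel_left_eq]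
    refine ⟨by simp, ?_⟩
    refine List.map_congr_left fun k _ => ?_
    simp only [Function.comp_apply]
    refine List.map_congr_left fun x _ => ?_
    simp only [Function.comp_apply, Nat.succ_eq_add_one]
    push_cast; ring

-- B's helper in canonical form
lemma go_eq (n v c s : Int) :
    diagonalizeGo n v c s
      = (List.range n.toNat).map (fun (k : Nat) =>
          (List.range n.toNat).map (fun (j : Nat) => v + (j : Int) * c + (k : Int) * s)) := by
  unfold diagonalizeGo
  rw [rowLoop, outLoop]
  simp only [PySem.List.length_pyRange_one, Int.sub_zero, List.nil_append, List.map_map]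
  rfl

-- reversing an upward unit range is the corresponding countdown range
lemma rev_pyRange (a b : Int) :
    (PySem.List.pyRange a b 1).reverse = PySem.List.pyRange (b - 1) (a - 1) (-1) := by
  rw [PySem.List.pyRange_neg_one_eq_reverse]
  norm_num

-- row i of A's base matrix, as a map over List.range
lemma arow (i n : Int) :
    PySem.List.pyRange i (i + n) 1 = (List.range n.toNat).map (fun (j : Nat) => i + (j : Int)) := by
  rw [PySem.List.pyRange_one]
  have h : i + n - i = n := by ring
  rw [h]

-- reversed row i of A's base matrix
lemma arow_rev (i n : Int) :
    (PySem.List.pyRange i (i + n) 1).reverse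
      = (List.range n.toNat).map (fun (j : Nat) => i + n - 1 - (j : Int)) := by
  rw [rev_pyRange, PySem.List.pyRange_neg_one]
  have h : i + n - 1 - (i - 1) = n := by ring
  rw [h]

-- mapping a function over A's outer range, forward
lemma outer_map (n : Int) (f : Int → List Int) :
    (PySem.List.pyRange 0 n 1).map f
      = (List.range n.toNat).map (fun (k : Nat) => f (k : Int)) := by
  rw [PySem.List.pyRange_one, List.map_map]
  simp [Function.comp]

-- mapping a function over A's reversed outer range (the a[::-1] branches)
lemma outer_map_rev (n : Int) (f : Int → List Int) :
    (PySem.List.pyRange 0 n 1).reverse.map f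
      = (List.range n.toNat).map (fun (k : Nat) => f (n - 1 - (k : Int))) := by
  rw [rev_pyRange, PySem.List.pyRange_neg_one, List.map_map]
  have h : n - 1 - (0 - 1) = n := by ring
  rw [h]
  simp [Function.comp]

-- ===== VERDICT (by name: the statement is the Claim_ definition above) =====
theorem diagonalize_spec : Claim_equal_diagonalize := by
  intro n d _ hpre
  unfold Spec_diagonalize diagonalize diagonalize_alt
  rcases hpre with h | h | h | h <;> subst h <;>
    simp only [beq_self_eq_true, if_true, String.reduceEq, beq_iff_eq, if_false,
      go_eq, PySem.List.slice?_none_none_neg_one, Option.getD_some, List.map_map]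
  · -- ul
    rw [outer_map]
    refine List.map_congr_left fun k _ => ?_
    rw [arow]
    exact List.map_congr_left fun j _ => by ring
  · -- ur
    rw [outer_map]
    refine List.map_congr_left fun k _ => ?_
    simp only [Function.comp_apply]
    rw [arow_rev]
    exact List.map_congr_left fun j _ => by ring
  · -- ll
    rw [← List.map_reverse, outer_map_rev]
    refine List.map_congr_left fun k _ => ?_
    rw [arow]
    exact List.map_congr_left fun j _ => by ring
  · -- lr
    rw [← List.map_reverse, List.map_map, outer_map_rev]
    refine List.map_congr_left fun k _ => ?_
    simp only [Function.comp_apply]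
    rw [arow_rev]
    exact List.map_congr_left fun j _ => by ring
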